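-- pv_equiv track=rewrite | github.com/clayton120178-sketch/backtest-pro | python/mappings.py | resolve_smc
-- ===== SOURCE A (Python) =====
-- SMC_MAP = {
--     # FVG
--     "fvg detectado":                 {"enum_bull": "BP_SMC_FVG_BULL",   "val_bull": 1,
--                                       "enum_bear": "BP_SMC_FVG_BEAR",   "val_bear": 2},
--     "preco retorna ao fvg":          {"enum_bull": "BP_SMC_FVG_BULL",   "val_bull": 1,
--                                       "enum_bear": "BP_SMC_FVG_BEAR",   "val_bear": 2},
--     # BoS
--     "bos detectado":                 {"enum_bull": "BP_SMC_BOS_BULL",   "val_bull": 3,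
--                                       "enum_bear": "BP_SMC_BOS_BEAR",   "val_bear": 4},
--     # CHoCH
--     "choch detectado":               {"enum_bull": "BP_SMC_CHOCH_BULL", "val_bull": 5,
--                                       "enum_bear": "BP_SMC_CHOCH_BEAR", "val_bear": 6},
--     # Order Block: REMOVIDO como conceito isolado.
--     # OB agora e filtro de mitigacao em BoS/CHoCH via InpOB_Mitigation
--     # (ver OB_MITIGATION_MAP abaixo). Valores 7/8 do enum estao reservados.
--
--     # Liquidity Sweep: HIGH=SELL (val_bear=9), LOW=BUY (val_bull=10)
--     # Logica: SWEEP_HIGH = BoS_Bull confirmado + reversao -> sinal de venda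
--     #         SWEEP_LOW  = BoS_Bear confirmado + reversao -> sinal de compra
--     "liquidity sweep detectado":     {"enum_bull": "BP_SMC_SWEEP_LOW",  "val_bull": 10,
--                                       "enum_bear": "BP_SMC_SWEEP_HIGH", "val_bear": 9},
--     # Liquidity Grab: HIGH=SELL (val_bear=11), LOW=BUY (val_bull=12)
--     # Logica: GRAB_HIGH = BoS_Bull falhado, rejeicao no topo -> sinal de venda
--     #         GRAB_LOW  = BoS_Bear falhado, rejeicao no fundo -> sinal de compra
--     "liquidity grab detectado":      {"enum_bull": "BP_SMC_GRAB_LOW",   "val_bull": 12,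
--                                       "enum_bear": "BP_SMC_GRAB_HIGH",  "val_bear": 11},
-- }
--
-- def normalize_condition_text(text):
--     """
--     Normaliza texto de condicao para busca no CONDITION_MAP.
--     Remove acentos comuns, lowercase, strip.
--     """
--     if not text:
--         return ""
--     t = text.lower().strip()
--     # Substituicoes de acentos mais comuns no portugues
--     replacements = {
--         "\u00e1": "a", "\u00e0": "a", "\u00e3": "a", "\u00e2": "a",
--         "\u00e9": "e", "\u00ea": "e",
--         "\u00ed": "i",
--         "\u00f3": "o", "\u00f4": "o", "\u00f5": "o",
--         "\u00fa": "u", "\u00fc": "u",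
--         "\u00e7": "c",
--         "\u00d7": "x",  # multiplicacao
--     }
--     for old, new in replacements.items():
--         t = t.replace(old, new)
--     return t
--
-- def resolve_smc(condition_text, direction="long"):
--     """
--     Resolve conceito Smart Money para enum EA.
--
--     Args:
--         condition_text: Texto da condicao SMC
--         direction: 'long' ou 'short' para escolher bull/bear
--
--     Returns:
--         int (valor do enum) ou None
--     """
--     norm = normalize_condition_text(condition_text)
--     for key, val in SMC_MAP.items():
--         if normalize_condition_text(key) == norm:
--             if direction == "long":
--                 return val["val_bull"]
--             else:
--                 return val["val_bear"]
--     return None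
-- ===== SOURCE B (Python) =====
-- SMC_VALUES = {
--     "fvg detectado":             (1, 2),
--     "preco retorna ao fvg":      (1, 2),
--     "bos detectado":             (3, 4),
--     "choch detectado":           (5, 6),
--     "liquidity sweep detectado": (10, 9),
--     "liquidity grab detectado":  (12, 11),
-- }
--
-- def normalize_condition_text(text):
--     if not text:
--         return ""
--     t = text.lower().strip()
--     replacements = {
--         "\u00e1": "a", "\u00e0": "a", "\u00e3": "a", "\u00e2": "a",
--         "\u00e9": "e", "\u00ea": "e",
--         "\u00ed": "i",
--         "\u00f3": "o", "\u00f4": "o", "\u00f5": "o",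
--         "\u00fa": "u", "\u00fc": "u",
--         "\u00e7": "c",
--         "\u00d7": "x",
--     }
--     for old, new in replacements.items():
--         t = t.replace(old, new)
--     return t
--
-- def resolve_smc(condition_text, direction="long"):
--     entry = SMC_VALUES.get(normalize_condition_text(condition_text))
--     if entry is None:
--         return None
--     return entry[0] if direction == "long" else entry[1]
-- ===== Notes on version B (the rewrite author's own statement) =====
-- stated objective: simpler
-- what changed: B normalizes the input once and does a single dict lookup in a precomputed value table (keys are already normalized), removing A's scan over SMC_MAP that re-normalizes every key on every call.
import Mathlib
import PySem

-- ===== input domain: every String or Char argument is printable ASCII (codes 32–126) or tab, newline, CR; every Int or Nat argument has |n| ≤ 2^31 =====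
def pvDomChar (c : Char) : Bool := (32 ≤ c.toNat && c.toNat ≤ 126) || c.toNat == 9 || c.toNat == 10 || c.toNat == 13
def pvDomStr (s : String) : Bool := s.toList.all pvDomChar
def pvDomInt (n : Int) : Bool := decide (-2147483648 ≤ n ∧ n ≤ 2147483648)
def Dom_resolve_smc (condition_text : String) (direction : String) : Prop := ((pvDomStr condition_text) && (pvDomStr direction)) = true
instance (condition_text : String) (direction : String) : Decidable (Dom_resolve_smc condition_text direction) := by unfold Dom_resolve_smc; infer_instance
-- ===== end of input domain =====

-- B replaces A's scan of SMC_MAP (re-normalizing every key) with a single dict lookup of the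
-- normalized input (objective: simpler; the keys are already in normalized form).

-- ===== PORT A =====
structure SmcEntry where
  enum_bull : String
  val_bull : Int
  enum_bear : String
  val_bear : Int
deriving Repr, DecidableEq

def SMC_MAP : List (String × SmcEntry) :=
  [ ("fvg detectado",             ⟨"BP_SMC_FVG_BULL",   1, "BP_SMC_FVG_BEAR",   2⟩),
    ("preco retorna ao fvg",      ⟨"BP_SMC_FVG_BULL",   1, "BP_SMC_FVG_BEAR",   2⟩),
    ("bos detectado",             ⟨"BP_SMC_BOS_BULL",   3, "BP_SMC_BOS_BEAR",   4⟩),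
    ("choch detectado",           ⟨"BP_SMC_CHOCH_BULL", 5, "BP_SMC_CHOCH_BEAR", 6⟩),
    ("liquidity sweep detectado", ⟨"BP_SMC_SWEEP_LOW",  10, "BP_SMC_SWEEP_HIGH", 9⟩),
    ("liquidity grab detectado",  ⟨"BP_SMC_GRAB_LOW",   12, "BP_SMC_GRAB_HIGH",  11⟩) ]

def smcReplacements : List (String × String) :=
  [ ("á", "a"), ("à", "a"), ("ã", "a"), ("â", "a"),
    ("é", "e"), ("ê", "e"),
    ("í", "i"),
    ("ó", "o"), ("ô", "o"), ("õ", "o"),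
    ("ú", "u"), ("ü", "u"),
    ("ç", "c"),
    ("×", "x") ]

def normalize_condition_text (text : String) : String :=
  if text == "" then ""
  else
    smcReplacements.foldl (fun t p => PySem.Str.replace t p.1 p.2)
      (PySem.Str.strip (PySem.Str.lower text))

def smcLoop (norm : String) (direction : String) : List (String × SmcEntry) → Option Int
  | [] => none
  | (key, val) :: rest =>
    if normalize_condition_text key == norm then
      if direction == "long" then some val.val_bull else some val.val_bear
    else smcLoop norm direction rest

def resolve_smc (condition_text : String) (direction : String) : Option Int :=
  smcLoop (normalize_condition_text condition_text) direction SMC_MAP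

-- ===== PORT B =====
def SMC_VALUES : PySem.Dict String (Int × Int) :=
  PySem.Dict.ofList
    [ ("fvg detectado",             (1, 2)),
      ("preco retorna ao fvg",      (1, 2)),
      ("bos detectado",             (3, 4)),
      ("choch detectado",           (5, 6)),
      ("liquidity sweep detectado", (10, 9)),
      ("liquidity grab detectado",  (12, 11)) ]

def resolve_smc_alt (condition_text : String) (direction : String) : Option Int :=
  match SMC_VALUES.get? (normalize_condition_text condition_text) with
  | none => none
  | some entry => if direction == "long" then some entry.1 else some entry.2

-- ===== PRECONDITION & SPEC =====
def Spec_resolve_smc (condition_text : String) (direction : String) (out : Option Int) : Prop := out = resolve_smc_alt condition_text direction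
instance (condition_text : String) (direction : String) (out : Option Int) : Decidable (Spec_resolve_smc condition_text direction out) := by unfold Spec_resolve_smc; infer_instance

-- ===== CLAIM (what is proved, stated in full; the proofs are below) =====
def Claim_equal_resolve_smc : Prop := ∀ (condition_text : String) (direction : String), Dom_resolve_smc condition_text direction → Spec_resolve_smc condition_text direction (resolve_smc condition_text direction)

-- ===== LEMMAS AND PROOFS =====

-- Every SMC_MAP key is already normalized, so A's per-key normalization is the identity.
-- Every SMC_MAP key is already normalized, so A's per-key normalization is the identity (nk1–nk6).
set_option maxRecDepth 4000 in
theorem smc_values_mk : SMC_VALUES = PySem.Dict.mk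
    [ ("fvg detectado",             ((1 : Int), (2 : Int))),
      ("preco retorna ao fvg",      (1, 2)),
      ("bos detectado",             (3, 4)),
      ("choch detectado",           (5, 6)),
      ("liquidity sweep detectado", (10, 9)),
      ("liquidity grab detectado",  (12, 11)) ] := by decide

set_option maxRecDepth 4000 in
theorem nk1 : normalize_condition_text "fvg detectado" = "fvg detectado" := by decide

set_option maxRecDepth 4000 in
theorem nk2 : normalize_condition_text "preco retorna ao fvg" = "preco retorna ao fvg" := by decide

set_option maxRecDepth 4000 in
theorem nk3 : normalize_condition_text "bos detectado" = "bos detectado" := by decide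

set_option maxRecDepth 4000 in
theorem nk4 : normalize_condition_text "choch detectado" = "choch detectado" := by decide

set_option maxRecDepth 4000 in
theorem nk5 : normalize_condition_text "liquidity sweep detectado" = "liquidity sweep detectado" := by decide

set_option maxRecDepth 4000 in
theorem nk6 : normalize_condition_text "liquidity grab detectado" = "liquidity grab detectado" := by decide

set_option maxRecDepth 4000 in
theorem loop_eq_lookup (norm direction : String) :
    smcLoop norm direction SMC_MAP =
      match SMC_VALUES.get? norm with
      | none => none
      | some entry => if direction == "long" then some entry.1 else some entry.2 := by
  simp only [SMC_MAP, smcLoop, nk1, nk2, nk3, nk4, nk5, nk6, smc_values_mk, PySem.Dict.get?_mk_cons]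
  split_ifs <;> simp_all [PySem.Dict.get?]

-- ===== VERDICT (by name: the statement is the Claim_ definition above) =====
theorem resolve_smc_spec : Claim_equal_resolve_smc := by
  intro ct dir _
  unfold Spec_resolve_smc resolve_smc resolve_smc_alt
  exact loop_eq_lookup _ _
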